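-- pv_equiv track=rewrite | github.com/Vicwel1/Cohort-Formation-LettuceMeet | cohort_noGui.py | select_best_cohorts
-- ===== SOURCE A (Python) =====
-- def is_feasible(possible_cohorts, num_cohorts, min_size, facilitators_info):
--     """Check if it's feasible to form the requested number of cohorts."""
--     if len(possible_cohorts) < num_cohorts:
--         return False
--
--     total_capacity = sum(info[1] for info in facilitators_info.values())
--     if total_capacity < num_cohorts:
--         return False
--
--     # Additional checks can be added here based on other constraints
--
--     return True
--
-- def select_best_cohorts(possible_cohorts, num_cohorts, min_size, facilitators_info):
--     """Select the best cohorts based on the number of participants and facilitator availability."""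
--
--     # First, check if it's feasible to form the requested number of cohorts
--     if not is_feasible(possible_cohorts, num_cohorts, min_size, facilitators_info):
--         raise ValueError("Unable to form the requested number of cohorts with the given parameters. Please adjust the parameters.")
--
--     # Priority is given to larger cohorts (more participants)
--     def cohort_priority(cohort):
--         return len(cohort[2])
--
--     sorted_cohorts = sorted(possible_cohorts, key=cohort_priority, reverse=True)
--
--     # Create a dictionary to track the remaining capacity of each facilitator
--     facilitator_capacity = {facilitator: info[1] for facilitator, info in facilitators_info.items()}
--
--     # Check if the facilitator is available for the given cohort time
--     def is_facilitator_available(facilitator, cohort_time):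
--         return any(start <= cohort_time[0] and end >= cohort_time[1] for start, end in facilitators_info[facilitator][0])
--
--     # Iterate through facilitators and assign the first available one with enough capacity
--     def assign_facilitator(cohort_time):
--         for facilitator in facilitator_capacity:
--             if facilitator_capacity[facilitator] > 0 and is_facilitator_available(facilitator, cohort_time):
--                 facilitator_capacity[facilitator] -= 1
--                 return facilitator
--         return None
--
--     def backtrack(selected, remaining):
--
--         # If the desired number of cohorts is reached, return the selection
--         if len(selected) == num_cohorts:
--             return selected
--
--         # If there are no more cohorts to consider, return None
--         if not remaining:
--             return None
--
--         current_cohort = remaining[0]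
--         updated_remaining = remaining[1:]
--
--         # Try to assign a facilitator to the current cohort
--         facilitator = assign_facilitator((current_cohort[0], current_cohort[1]))
--         if facilitator:
--             updated_selected = selected + [(current_cohort[0], current_cohort[1], current_cohort[2], facilitator)]
--             selected_names = {name for _, _, cohort, _ in updated_selected for name in cohort}
--             next_remaining = [
--                 c for c in updated_remaining
--                 if not any(name in selected_names for name in c[2]) and len(c[2]) >= min_size
--             ]
--
--             result = backtrack(updated_selected, next_remaining)
--             if result:
--                 return result
--
--             # If this path doesn't lead to a solution, backtrack and restore the facilitator's capacity
--             facilitator_capacity[facilitator] += 1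
--
--         # Try excluding the current cohort
--         return backtrack(selected, updated_remaining)
--
--     # Start the backtracking process with an empty selection and the sorted list of cohorts
--     return backtrack([], sorted_cohorts) or []
-- ===== SOURCE B (Python) =====
-- def select_best_cohorts(possible_cohorts, num_cohorts, min_size, facilitators_info):
--     """Iterative explicit-stack DFS instead of recursion; same first-found selection."""
--     if len(possible_cohorts) < num_cohorts or \
--             sum(info[1] for info in facilitators_info.values()) < num_cohorts:
--         raise ValueError("Unable to form the requested number of cohorts with the given parameters. Please adjust the parameters.")
--
--     sorted_cohorts = sorted(possible_cohorts, key=lambda c: len(c[2]), reverse=True)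
--     capacity = {f: info[1] for f, info in facilitators_info.items()}
--
--     def available(f, t):
--         return any(s <= t[0] and e >= t[1] for s, e in facilitators_info[f][0])
--
--     # Each stack entry is either ('explore', selected, remaining) or ('restore', facilitator).
--     stack = [('explore', [], sorted_cohorts)]
--     while stack:
--         frame = stack.pop()
--         if frame[0] == 'restore':
--             capacity[frame[1]] += 1
--             continue
--         _, selected, remaining = frame
--         if len(selected) == num_cohorts:
--             return selected
--         if not remaining:
--             continue
--         cur, rest = remaining[0], remaining[1:]
--         # Exclude-branch frame goes underneath so the include branch is explored first.
--         stack.append(('explore', selected, rest))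
--         fac = None
--         for f in capacity:
--             if capacity[f] > 0 and available(f, (cur[0], cur[1])):
--                 capacity[f] -= 1
--                 fac = f
--                 break
--         if fac:
--             sel2 = selected + [(cur[0], cur[1], cur[2], fac)]
--             names = {n for _, _, c, _ in sel2 for n in c}
--             nxt = [c for c in rest
--                    if not any(n in names for n in c[2]) and len(c[2]) >= min_size]
--             stack.append(('restore', fac))
--             stack.append(('explore', sel2, nxt))
--     return []
-- ===== Notes on version B (the rewrite author's own statement) =====
-- stated objective: alternative
-- what changed: Replaces A's recursive backtracking (nested recursion with a mutable capacity dict restored after a failed include branch) by an explicit stack-based iterative DFS whose frames are (selected, remaining) explore entries plus restore-capacity entries, exploring include before exclude so the same first-found selection is returned.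
import Mathlib
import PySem

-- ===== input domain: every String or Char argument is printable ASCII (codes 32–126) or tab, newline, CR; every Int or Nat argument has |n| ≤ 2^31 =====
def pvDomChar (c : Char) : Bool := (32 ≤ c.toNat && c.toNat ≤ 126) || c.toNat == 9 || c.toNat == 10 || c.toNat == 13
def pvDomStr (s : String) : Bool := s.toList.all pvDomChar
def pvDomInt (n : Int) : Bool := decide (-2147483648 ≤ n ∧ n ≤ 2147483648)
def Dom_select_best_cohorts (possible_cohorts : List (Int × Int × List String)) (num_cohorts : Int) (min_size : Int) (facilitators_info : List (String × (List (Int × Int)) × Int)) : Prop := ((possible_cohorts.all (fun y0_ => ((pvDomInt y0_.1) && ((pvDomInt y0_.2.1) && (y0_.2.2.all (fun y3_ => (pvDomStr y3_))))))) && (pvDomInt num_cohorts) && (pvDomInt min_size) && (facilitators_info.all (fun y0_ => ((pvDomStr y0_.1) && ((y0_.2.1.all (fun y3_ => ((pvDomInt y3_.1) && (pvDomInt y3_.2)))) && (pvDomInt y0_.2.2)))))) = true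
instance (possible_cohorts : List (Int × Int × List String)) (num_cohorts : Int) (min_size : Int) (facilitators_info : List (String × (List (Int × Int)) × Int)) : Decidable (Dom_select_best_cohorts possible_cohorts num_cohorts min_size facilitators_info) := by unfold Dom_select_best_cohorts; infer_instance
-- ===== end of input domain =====

-- B replaces A's recursive backtracking with an explicit stack-based iterative DFS (same
-- first-found selection); objective: alternative decomposition, not claimed faster.

-- ===== PORT A =====
-- shared data helpers (both Pythons contain these same lines: feasibility check,
-- facilitator availability, greedy assignment, selected-name set and remaining filter)

-- is_feasible(possible_cohorts, num_cohorts, min_size, facilitators_info)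
def pvFeasible (possible_cohorts : List (Int × Int × List String)) (num_cohorts : Int)
    (fi : PySem.Dict String ((List (Int × Int)) × Int)) : Bool :=
  if (possible_cohorts.length : Int) < num_cohorts then false
  else if ((fi.values.map (fun info => info.2)).sum < num_cohorts) then false
  else true

-- is_facilitator_available(facilitator, cohort_time); the key is always present (it comes
-- from the capacity dict built from the same keys), so getD's default is never read
def pvAvail (fi : PySem.Dict String ((List (Int × Int)) × Int)) (f : String) (t : Int × Int) : Bool :=
  ((fi.getD f ([], 0)).1).any (fun se => decide (se.1 ≤ t.1) && decide (t.2 ≤ se.2))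

-- assign_facilitator(cohort_time): first facilitator (dict order) with capacity > 0 and
-- available; decrement its capacity
def pvAssign (fi : PySem.Dict String ((List (Int × Int)) × Int))
    (cap : PySem.Dict String Int) (t : Int × Int) : Option String × PySem.Dict String Int :=
  match cap.keys.find? (fun f => decide (0 < cap.getD f 0) && pvAvail fi f t) with
  | some f => (some f, cap.modify f 0 (fun v => v - 1))
  | none => (none, cap)

-- {name for _, _, cohort, _ in updated_selected for name in cohort}
def pvNames (sel : List (Int × Int × List String × String)) : PySem.Set String :=
  PySem.Set.ofList (sel.flatMap (fun s => s.2.2.1))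

-- next_remaining filter
def pvNext (min_size : Int) (names : PySem.Set String) (rest : List (Int × Int × List String)) :
    List (Int × Int × List String) :=
  rest.filter (fun c => (!(c.2.2.any (fun n => PySem.Set.contains names n))) && decide (min_size ≤ (c.2.2.length : Int)))

-- backtrack(selected, remaining), threading the mutable facilitator_capacity dict
def backtrackA (fi : PySem.Dict String ((List (Int × Int)) × Int)) (num_cohorts min_size : Int)
    (selected : List (Int × Int × List String × String))
    (remaining : List (Int × Int × List String)) (cap : PySem.Dict String Int) :
    Option (List (Int × Int × List String × String)) × PySem.Dict String Int :=
  if (selected.length : Int) = num_cohorts then (some selected, cap)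
  else match remaining with
  | [] => (none, cap)
  | cur :: rest =>
    match pvAssign fi cap (cur.1, cur.2.1) with
    | (some f, cap1) =>
      if f ≠ "" then   -- 'if facilitator:' — Python truthiness: None and "" both skip
        let sel2 := selected ++ [(cur.1, cur.2.1, cur.2.2, f)]
        let nxt := pvNext min_size (pvNames sel2) rest
        match backtrackA fi num_cohorts min_size sel2 nxt cap1 with
        | (some r, cap2) =>
          if r ≠ [] then (some r, cap2)   -- 'if result: return result'
          else backtrackA fi num_cohorts min_size selected rest (cap2.modify f 0 (fun v => v + 1))
        | (none, cap2) => backtrackA fi num_cohorts min_size selected rest (cap2.modify f 0 (fun v => v + 1))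
      else backtrackA fi num_cohorts min_size selected rest cap1
    | (none, cap1) => backtrackA fi num_cohorts min_size selected rest cap1
termination_by remaining.length
decreasing_by all_goals
  first
    | (exact Nat.lt_succ_of_le (le_trans (List.length_filter_le _ rest) (by simp)))
    | simp

def select_best_cohorts (possible_cohorts : List (Int × Int × List String)) (num_cohorts : Int) (min_size : Int) (facilitators_info : List (String × (List (Int × Int)) × Int)) : List (Int × Int × List String × String) :=
  let fi := PySem.Dict.ofList facilitators_info
  if !pvFeasible possible_cohorts num_cohorts fi then []   -- Python raises ValueError here (outside Pre_)
  else
    let sorted_cohorts := PySem.List.sorted possible_cohorts (fun c => (c.2.2.length : Int)) true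
    let cap0 := PySem.Dict.ofList (fi.items.map (fun p => (p.1, p.2.2)))
    match backtrackA fi num_cohorts min_size [] sorted_cohorts cap0 with
    | (some r, _) => if r ≠ [] then r else []    -- 'backtrack(...) or []'
    | (none, _) => []

-- ===== PORT B =====
-- stack frames: ('explore', selected, remaining) / ('restore', facilitator)
inductive PvFrame where
  | explore : List (Int × Int × List String × String) → List (Int × Int × List String) → PvFrame
  | restore : String → PvFrame
deriving DecidableEq, Repr

def pvWeight : PvFrame → Nat
  | PvFrame.explore _ rem => 2 * 3 ^ rem.length
  | PvFrame.restore _ => 1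

-- the while loop over the explicit stack
def runB (fi : PySem.Dict String ((List (Int × Int)) × Int)) (num_cohorts min_size : Int)
    (stack : List PvFrame) (cap : PySem.Dict String Int) :
    List (Int × Int × List String × String) :=
  match stack with
  | [] => []                                   -- stack exhausted: return []
  | PvFrame.restore f :: S =>
    runB fi num_cohorts min_size S (cap.modify f 0 (fun v => v + 1))
  | PvFrame.explore sel rem :: S =>
    if (sel.length : Int) = num_cohorts then sel
    else match rem with
    | [] => runB fi num_cohorts min_size S cap
    | cur :: rest =>
      -- exclude-branch frame underneath; include branch (with its restore frame) on top
      match pvAssign fi cap (cur.1, cur.2.1) with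
      | (some f, cap1) =>
        if f ≠ "" then
          let sel2 := sel ++ [(cur.1, cur.2.1, cur.2.2, f)]
          let nxt := pvNext min_size (pvNames sel2) rest
          runB fi num_cohorts min_size
            (PvFrame.explore sel2 nxt :: PvFrame.restore f :: PvFrame.explore sel rest :: S) cap1
        else runB fi num_cohorts min_size (PvFrame.explore sel rest :: S) cap1
      | (none, cap1) => runB fi num_cohorts min_size (PvFrame.explore sel rest :: S) cap1
termination_by (stack.map pvWeight).sum
decreasing_by all_goals
  simp only [List.map_cons, List.sum_cons, pvWeight, List.length_cons, List.length_nil, pow_succ]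
  first
    | omega
    | (have h1 : (3:Nat) ^ (pvNext min_size (pvNames (sel ++ [(cur.1, cur.2.1, cur.2.2, f)])) rest).length ≤ 3 ^ rest.length :=
         Nat.pow_le_pow_right (by norm_num) (by simpa [pvNext] using List.length_filter_le _ rest)
       have h2 : (1:Nat) ≤ 3 ^ rest.length := Nat.one_le_pow _ _ (by norm_num)
       omega)
    | (have h2 : (1:Nat) ≤ 3 ^ rest.length := Nat.one_le_pow _ _ (by norm_num)
       omega)

def select_best_cohorts_alt (possible_cohorts : List (Int × Int × List String)) (num_cohorts : Int) (min_size : Int) (facilitators_info : List (String × (List (Int × Int)) × Int)) : List (Int × Int × List String × String) :=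
  let fi := PySem.Dict.ofList facilitators_info
  if !pvFeasible possible_cohorts num_cohorts fi then []   -- Python raises ValueError here (outside Pre_)
  else
    let sorted_cohorts := PySem.List.sorted possible_cohorts (fun c => (c.2.2.length : Int)) true
    let cap0 := PySem.Dict.ofList (fi.items.map (fun p => (p.1, p.2.2)))
    runB fi num_cohorts min_size [PvFrame.explore [] sorted_cohorts] cap0

-- ===== PRECONDITION & SPEC =====
-- Pre_ excludes exactly the inputs on which A raises ValueError ("not feasible": fewer
-- possible cohorts than requested, or total facilitator capacity below the request).
def Pre_select_best_cohorts (possible_cohorts : List (Int × Int × List String)) (num_cohorts : Int) (min_size : Int) (facilitators_info : List (String × (List (Int × Int)) × Int)) : Prop :=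
  num_cohorts ≤ (possible_cohorts.length : Int) ∧
  num_cohorts ≤ (((PySem.Dict.ofList facilitators_info).values.map (fun info => info.2)).sum)
instance (possible_cohorts : List (Int × Int × List String)) (num_cohorts : Int) (min_size : Int) (facilitators_info : List (String × (List (Int × Int)) × Int)) : Decidable (Pre_select_best_cohorts possible_cohorts num_cohorts min_size facilitators_info) := by unfold Pre_select_best_cohorts; infer_instance

def pvWitness_select_best_cohorts : (List (Int × Int × List String)) × Int × Int × (List (String × (List (Int × Int)) × Int)) := ([(0, 1, ["a"])], 1, 1, [("f", [(0, 1)], 1)])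

def Spec_select_best_cohorts (possible_cohorts : List (Int × Int × List String)) (num_cohorts : Int) (min_size : Int) (facilitators_info : List (String × (List (Int × Int)) × Int)) (out : List (Int × Int × List String × String)) : Prop := out = select_best_cohorts_alt possible_cohorts num_cohorts min_size facilitators_info
instance (possible_cohorts : List (Int × Int × List String)) (num_cohorts : Int) (min_size : Int) (facilitators_info : List (String × (List (Int × Int)) × Int)) (out : List (Int × Int × List String × String)) : Decidable (Spec_select_best_cohorts possible_cohorts num_cohorts min_size facilitators_info out) := by unfold Spec_select_best_cohorts; infer_instance

-- ===== CLAIM (what is proved, stated in full; the proofs are below) =====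
def Claim_equal_select_best_cohorts : Prop := ∀ (possible_cohorts : List (Int × Int × List String)) (num_cohorts : Int) (min_size : Int) (facilitators_info : List (String × (List (Int × Int)) × Int)), Dom_select_best_cohorts possible_cohorts num_cohorts min_size facilitators_info → Pre_select_best_cohorts possible_cohorts num_cohorts min_size facilitators_info → Spec_select_best_cohorts possible_cohorts num_cohorts min_size facilitators_info (select_best_cohorts possible_cohorts num_cohorts min_size facilitators_info)

-- ===== LEMMAS AND PROOFS =====

-- a successful backtrack never shrinks the selection
lemma backtrackA_len (fi : PySem.Dict String ((List (Int × Int)) × Int)) (num_cohorts min_size : Int) :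
    ∀ (n : Nat) (remaining : List (Int × Int × List String)), remaining.length ≤ n →
    ∀ selected cap r cap',
      backtrackA fi num_cohorts min_size selected remaining cap = (some r, cap') →
      selected.length ≤ r.length := by
  intro n
  induction n with
  | zero =>
    intro remaining hlen sel cap r cap' hbt
    have hnil : remaining = [] := List.eq_nil_of_length_eq_zero (Nat.le_zero.mp hlen)
    subst hnil
    rw [backtrackA.eq_def] at hbt
    by_cases hs : (sel.length : Int) = num_cohorts
    · simp [hs] at hbt
      exact le_of_eq (congrArg List.length hbt.1)
    · simp [hs] at hbt
  | succ n ih =>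
    intro remaining hlen sel cap r cap' hbt
    rw [backtrackA.eq_def] at hbt
    by_cases hs : (sel.length : Int) = num_cohorts
    · simp [hs] at hbt
      exact le_of_eq (congrArg List.length hbt.1)
    · simp only [hs, if_false] at hbt
      cases remaining with
      | nil => simp at hbt
      | cons cur rest =>
        have hr : rest.length ≤ n := by simpa using hlen
        simp only [] at hbt
        cases hA : pvAssign fi cap (cur.1, cur.2.1) with
        | mk f? cap1 =>
          rw [hA] at hbt
          cases f? with
          | none =>
            simp only [] at hbt
            exact ih rest hr sel cap1 r cap' hbt
          | some f =>
            by_cases hf : f = ""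
            · simp [hf] at hbt
              exact ih rest hr sel cap1 r cap' hbt
            · simp only [hf, ne_eq, not_false_iff, if_pos] at hbt
              cases hI : backtrackA fi num_cohorts min_size (sel ++ [(cur.1, cur.2.1, cur.2.2, f)])
                  (pvNext min_size (pvNames (sel ++ [(cur.1, cur.2.1, cur.2.2, f)])) rest) cap1 with
              | mk ri? cap2 =>
                rw [hI] at hbt
                cases ri? with
                | none =>
                  simp only [] at hbt
                  exact ih rest hr sel _ r cap' hbt
                | some ri =>
                  by_cases hri : ri = []
                  · simp [hri] at hbt
                    exact ih rest hr sel _ r cap' hbt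
                  · simp [hri] at hbt
                    have h1 : (sel ++ [(cur.1, cur.2.1, cur.2.2, f)]).length ≤ ri.length := by
                      refine ih _ ?_ _ cap1 ri cap2 hI
                      calc (pvNext min_size (pvNames (sel ++ [(cur.1, cur.2.1, cur.2.2, f)])) rest).length
                          ≤ rest.length := by simpa [pvNext] using List.length_filter_le _ rest
                        _ ≤ n := hr
                    have := hbt.1
                    subst this
                    simpa using le_trans (by simp) h1

-- the stack machine simulates the recursion under any continuation stack
lemma runB_sim (fi : PySem.Dict String ((List (Int × Int)) × Int)) (num_cohorts min_size : Int) :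
        ∀ (n : Nat) (remaining : List (Int × Int × List String)), remaining.length ≤ n →
    ∀ selected cap S,
      runB fi num_cohorts min_size (PvFrame.explore selected remaining :: S) cap =
        (match backtrackA fi num_cohorts min_size selected remaining cap with
         | (some r, _) => r
         | (none, cap') => runB fi num_cohorts min_size S cap') := by
  intro n
  induction n with
  | zero =>
    intro remaining hlen sel cap S
    have hnil : remaining = [] := List.eq_nil_of_length_eq_zero (Nat.le_zero.mp hlen)
    subst hnil
    rw [backtrackA.eq_def]
    conv_lhs => rw [runB.eq_def]
    by_cases hs : (sel.length : Int) = num_cohorts <;> simp [hs]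
  | succ n ih =>
    intro remaining hlen sel cap S
    rw [backtrackA.eq_def]
    conv_lhs => rw [runB.eq_def]
    by_cases hs : (sel.length : Int) = num_cohorts
    · simp [hs]
    · simp only [hs, if_false]
      cases remaining with
      | nil => simp
      | cons cur rest =>
        have hr : rest.length ≤ n := by simpa using hlen
        simp only []
        cases hA : pvAssign fi cap (cur.1, cur.2.1) with
        | mk f? cap1 =>
          cases f? with
          | none =>
            simp only []
            exact ih rest hr sel cap1 S
          | some f =>
            by_cases hf : f = ""
            · simp only [hf, ne_eq, not_true_eq_false, if_false]
              exact ih rest hr sel cap1 S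
            · simp only [hf, ne_eq, not_false_iff, if_pos]
              rw [ih (pvNext min_size (pvNames (sel ++ [(cur.1, cur.2.1, cur.2.2, f)])) rest)
                    (le_trans (by simpa [pvNext] using List.length_filter_le _ rest) hr)
                    (sel ++ [(cur.1, cur.2.1, cur.2.2, f)]) cap1
                    (PvFrame.restore f :: PvFrame.explore sel rest :: S)]
              cases hI : backtrackA fi num_cohorts min_size (sel ++ [(cur.1, cur.2.1, cur.2.2, f)])
                  (pvNext min_size (pvNames (sel ++ [(cur.1, cur.2.1, cur.2.2, f)])) rest) cap1 with
              | mk ri? cap2 =>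
                cases ri? with
                | none =>
                  simp only []
                  conv_lhs => rw [runB.eq_def]
                  simp only []
                  exact ih rest hr sel (cap2.modify f 0 (fun v => v + 1)) S
                | some ri =>
                  have hri : ri ≠ [] := by
                    intro hnil2
                    have h1 : (sel ++ [(cur.1, cur.2.1, cur.2.2, f)]).length ≤ ri.length :=
                      backtrackA_len fi num_cohorts min_size n _
                        (le_trans (by simpa [pvNext] using List.length_filter_le _ rest) hr)
                        _ cap1 ri cap2 hI
                    rw [hnil2] at h1
                    simp at h1
                  simp [hri]

-- ===== VERDICT (by name: the statement is the Claim_ definition above) =====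
theorem select_best_cohorts_spec : Claim_equal_select_best_cohorts := by
  intro pc nc ms fil _ _
  unfold Spec_select_best_cohorts select_best_cohorts select_best_cohorts_alt
  by_cases hf : pvFeasible pc nc (PySem.Dict.ofList fil) = true
  · simp only [hf, Bool.not_true, Bool.false_eq_true, if_false]
    rw [runB_sim _ nc ms _ _ (le_refl _)]
    cases hb : backtrackA (PySem.Dict.ofList fil) nc ms [] (PySem.List.sorted pc (fun c => (c.2.2.length : Int)) true) (PySem.Dict.ofList ((PySem.Dict.ofList fil).items.map (fun p => (p.1, p.2.2)))) with
    | mk r? cap' =>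
      cases r? with
      | some r =>
        by_cases hr : r = [] <;> simp [hr]
      | none => simp [runB]
  · simp [hf]
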